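-- pv_equiv track=rewrite | github.com/jorgef21/Python | bestseat.py | findBestSeat
-- ===== SOURCE A (Python) =====
-- def findBestSeat(seats):
--     pairs = []
--     current_first = None
--     first_free = None
--     for index, num in enumerate(seats):
--         if num == 1:
--             if current_first is None:
--                 first_free = index
--                 current_first = index
--             else:
--                 pairs.append((current_first, index))
--                 current_first = index
--     last_free = current_first
--     max_distance = 0
--     current_max = None
--     for pair in pairs:
--         distance = pair[1] - pair[0] - 1
--         if distance > max_distance:
--             max_distance = distance
--             current_max = pair
--
--     if max_distance <= first_free and seats[0] != 1:
--         return 0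
--     if max_distance < len(seats) - last_free:
--         return len(seats) - 1
--     return current_max[0] + (current_max[1] - current_max[0]) // 2
-- ===== SOURCE B (Python) =====
-- def findBestSeat(seats):
--     # Run-length encode the row into maximal runs (occupied?, start, length).
--     runs = []
--     for i, x in enumerate(seats):
--         occ = (x == 1)
--         if runs and runs[-1][0] == occ:
--             o, s, l = runs[-1]
--             runs[-1] = (o, s, l + 1)
--         else:
--             runs.append((occ, i, 1))
--     lead = seats.index(1)  # free seats before the first occupied one; ValueError when nobody is seated
--     trail = runs[-1][2] if not runs[-1][0] else 0
--     best_len, best_start = 0, 0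
--     for occ, start, length in runs[1:-1]:
--         if not occ and best_len < length:
--             best_len, best_start = length, start
--     if 0 < lead and best_len <= lead:
--         return 0
--     if best_len <= trail:
--         return len(seats) - 1
--     return best_start - 1 + (best_len + 1) // 2
-- ===== Notes on version B (the rewrite author's own statement) =====
-- stated objective: alternative
-- what changed: B run-length encodes the row into maximal (occupied,start,length) runs and decides from that structure (leading run, trailing run, widest interior empty run), instead of A's state machine that pairs consecutive occupied indices and scans the pair list for the widest gap.
import Mathlib
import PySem

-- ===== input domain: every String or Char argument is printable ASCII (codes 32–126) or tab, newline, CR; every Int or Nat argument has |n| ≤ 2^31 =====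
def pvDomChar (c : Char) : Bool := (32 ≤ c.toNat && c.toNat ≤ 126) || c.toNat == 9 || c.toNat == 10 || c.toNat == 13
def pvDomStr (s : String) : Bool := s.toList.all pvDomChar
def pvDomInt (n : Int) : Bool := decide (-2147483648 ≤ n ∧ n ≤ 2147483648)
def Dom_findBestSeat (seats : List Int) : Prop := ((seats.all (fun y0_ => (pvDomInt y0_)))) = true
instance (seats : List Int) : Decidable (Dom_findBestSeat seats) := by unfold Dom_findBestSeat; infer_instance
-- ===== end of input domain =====

-- B re-implements the search by run-length encoding the row into maximal runs, instead of
-- A's pairing of consecutive occupied indices; alternative structure, same cost.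

-- ===== PORT A =====
-- loop body of A's first loop; state = (pairs, current_first, first_free)
def pvStepA (st : List (Int × Int) × Option Int × Option Int) (p : Int × Int) :
    List (Int × Int) × Option Int × Option Int :=
  if p.2 == 1 then
    match st.2.1 with
    | none => (st.1, some p.1, some p.1)
    | some c => (st.1 ++ [(c, p.1)], some p.1, st.2.2)
  else st

-- loop body of A's second loop; acc = (max_distance, current_max)
def pvStep2 (acc : Int × Option (Int × Int)) (pair : Int × Int) : Int × Option (Int × Int) :=
  let distance := pair.2 - pair.1 - 1
  if acc.1 < distance then (distance, some pair) else acc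

def findBestSeat (seats : List Int) : Int :=
  let st := (PySem.List.enumerate seats).foldl pvStepA ([], none, none)
  let pairs := st.1
  let last_free := st.2.1
  let first_free := st.2.2
  let md := pairs.foldl pvStep2 (0, none)
  -- Python raises TypeError below when first_free is None (no occupied seat); those inputs are outside Pre_
  match first_free, last_free with
  | some ff, some lf =>
    if md.1 ≤ ff ∧ ¬ ((PySem.List.pyGet? seats 0).getD 0 == 1) then 0
    else if md.1 < (seats.length : Int) - lf then (seats.length : Int) - 1
    else
      match md.2 with
      | some cm => cm.1 + PySem.Int.floordiv (cm.2 - cm.1) 2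
      | none => 0            -- Python raises TypeError here; unreachable under Pre_
  | _, _ => 0                -- Python raises TypeError here; outside Pre_

-- ===== PORT B =====
-- loop body of B's run-length-encoding loop (mutate runs[-1] / append)
def pvRunStep (runs : List (Bool × Int × Int)) (p : Int × Int) : List (Bool × Int × Int) :=
  let occ : Bool := p.2 == 1
  match runs.getLast? with
  | some r => if r.1 == occ then runs.dropLast ++ [(r.1, r.2.1, r.2.2 + 1)]
              else runs ++ [(occ, p.1, 1)]
  | none => runs ++ [(occ, p.1, 1)]

-- `runs[-1][2] if not runs[-1][0] else 0`
def pvTrailOf (rs : List (Bool × Int × Int)) : Int :=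
  match rs.getLast? with
  | some r => if r.1 = false then r.2.2 else 0
  | none => 0

-- loop body of B's best-interior-run loop; acc = (best_len, best_start)
def pvBestStep (acc : Int × Int) (r : Bool × Int × Int) : Int × Int :=
  if r.1 = false ∧ acc.1 < r.2.2 then (r.2.2, r.2.1) else acc

def findBestSeat_alt (seats : List Int) : Int :=
  let runs := (PySem.List.enumerate seats).foldl pvRunStep []
  -- `seats.index(1)` raises ValueError when no seat equals 1; those inputs are outside Pre_
  match PySem.List.index? seats 1 with
  | none => 0
  | some first =>
    let lead : Int := (first : Int)
    let trail := pvTrailOf runs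
    let best := (PySem.List.slice runs (some 1) (some (-1))).foldl pvBestStep (0, 0)
    if 0 < lead ∧ best.1 ≤ lead then 0
    else if best.1 ≤ trail then (seats.length : Int) - 1
    else best.2 - 1 + PySem.Int.floordiv (best.1 + 1) 2

-- ===== PRECONDITION & SPEC =====
-- Pre_ excludes exactly the inputs with no occupied seat (no element equal to 1), where A raises TypeError.
def Pre_findBestSeat (seats : List Int) : Prop := (1 : Int) ∈ seats
instance (seats : List Int) : Decidable (Pre_findBestSeat seats) := by unfold Pre_findBestSeat; infer_instance
def pvWitness_findBestSeat : List Int := [1, 0, 0, 0, 1, 0, 1]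

def Spec_findBestSeat (seats : List Int) (out : Int) : Prop := out = findBestSeat_alt seats
instance (seats : List Int) (out : Int) : Decidable (Spec_findBestSeat seats out) := by unfold Spec_findBestSeat; infer_instance

-- ===== CLAIM (what is proved, stated in full; the proofs are below) =====
def Claim_equal_findBestSeat : Prop := ∀ (seats : List Int), Dom_findBestSeat seats → Pre_findBestSeat seats → Spec_findBestSeat seats (findBestSeat seats)

-- ===== LEMMAS AND PROOFS =====

-- the occupied-index list of xs, indices starting at s
def pvOcc (xs : List Int) (s : Int) : List Int :=
  ((PySem.List.enumerate xs s).filter (fun p => p.2 == 1)).map (fun p => p.1)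

theorem pvOcc_nil (s : Int) : pvOcc [] s = [] := by
  simp [pvOcc, PySem.List.enumerate_nil]

theorem pvOcc_cons (x : Int) (xs : List Int) (s : Int) :
    pvOcc (x :: xs) s = if x == 1 then s :: pvOcc xs (s + 1) else pvOcc xs (s + 1) := by
  simp only [pvOcc, PySem.List.enumerate_cons, List.filter_cons]
  split <;> simp_all

theorem pvOcc_mem_bounds (xs : List Int) (s : Int) (y : Int) (hy : y ∈ pvOcc xs s) :
    s ≤ y ∧ y < s + xs.length := by
  simp only [pvOcc, List.mem_map, List.mem_filter] at hy
  obtain ⟨p, ⟨hp, -⟩, rfl⟩ := hy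
  rw [PySem.List.mem_enumerate_iff] at hp
  obtain ⟨k, hk, rfl⟩ := hp
  refine ⟨?_, ?_⟩
  · show s ≤ s + (k : Int)
    omega
  · show s + (k : Int) < s + (xs.length : Int)
    omega

theorem pvOcc_ne_nil (xs : List Int) (s : Int) (h : (1 : Int) ∈ xs) : pvOcc xs s ≠ [] := by
  obtain ⟨k, hk, hv⟩ := List.mem_iff_getElem.mp h
  have hmem : (s + (k : Int)) ∈ pvOcc xs s := by
    simp only [pvOcc, List.mem_map, List.mem_filter]
    exact ⟨(s + (k : Int), xs[k]), ⟨(PySem.List.mem_enumerate_iff xs s _).mpr ⟨k, hk, rfl⟩,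
      by simp [hv]⟩, rfl⟩
  intro hnil
  rw [hnil] at hmem
  simp at hmem

-- A's first loop, once the first occupied seat has been seen
theorem foldA_after (xs : List Int) (s : Int) (P : List (Int × Int)) (c f : Int) :
    (PySem.List.enumerate xs s).foldl pvStepA (P, some c, some f)
      = (P ++ (c :: pvOcc xs s).zip (pvOcc xs s), (c :: pvOcc xs s).getLast?, some f) := by
  induction xs generalizing s P c with
  | nil => simp [PySem.List.enumerate_nil, pvOcc_nil]
  | cons x xs ih =>
    rw [PySem.List.enumerate_cons, List.foldl_cons]
    by_cases hx : (x == 1) = true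
    · have hstep : pvStepA (P, some c, some f) (s, x) = (P ++ [(c, s)], some s, some f) := by
        simp [pvStepA, hx]
      rw [hstep, ih, pvOcc_cons]
      simp [hx, List.getLast?_cons_cons]
    · have hstep : pvStepA (P, some c, some f) (s, x) = (P, some c, some f) := by
        simp [pvStepA, hx]
      rw [hstep, ih, pvOcc_cons]
      simp [hx]

-- A's first loop from the initial state
theorem foldA_before (xs : List Int) (s : Int) (f : Int) (L : List Int)
    (hL : pvOcc xs s = f :: L) :
    (PySem.List.enumerate xs s).foldl pvStepA ([], none, none)
      = ((f :: L).zip L, (f :: L).getLast?, some f) := by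
  induction xs generalizing s with
  | nil => rw [pvOcc_nil] at hL; exact absurd hL (by simp)
  | cons x xs ih =>
    rw [PySem.List.enumerate_cons, List.foldl_cons]
    rw [pvOcc_cons] at hL
    by_cases hx : (x == 1) = true
    · rw [if_pos hx] at hL
      obtain ⟨rfl, hL'⟩ : s = f ∧ pvOcc xs (s + 1) = L := by
        constructor <;> [exact (List.cons_eq_cons.mp hL).1; exact (List.cons_eq_cons.mp hL).2]
      have hstep : pvStepA (([], none, none) : List (Int × Int) × Option Int × Option Int) (s, x)
          = ([], some s, some s) := by simp [pvStepA, hx]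
      rw [hstep, foldA_after, hL']
      simp
    · rw [if_neg hx] at hL
      have hstep : pvStepA (([], none, none) : List (Int × Int) × Option Int × Option Int) (s, x)
          = ([], none, none) := by simp [pvStepA, hx]
      rw [hstep, ih (s + 1) hL]

-- seats[0] != 1  iff the first occupied index is non-zero
theorem pvHeadOne (a : Int) (rest : List Int) (f : Int) (L : List Int)
    (hfl : pvOcc (a :: rest) 0 = f :: L) : a = 1 ↔ f = 0 := by
  rw [pvOcc_cons] at hfl
  by_cases ha : (a == 1) = true
  · rw [if_pos ha] at hfl
    have hf : f = 0 := ((List.cons_eq_cons.mp hfl).1).symm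
    exact iff_of_true (by simpa [beq_iff_eq] using ha) hf
  · rw [if_neg ha] at hfl
    have hf : f ∈ pvOcc rest (0 + 1) := by rw [hfl]; simp
    have hb := (pvOcc_mem_bounds rest (0 + 1) f hf).1
    exact iff_of_false (by simpa [beq_iff_eq] using ha) (by omega)

-- ---- B-side machinery: a recursive description of the run-length encoding ----

def pvMerge (c : Bool × Int × Int) (rs : List (Bool × Int × Int)) : List (Bool × Int × Int) :=
  match rs with
  | r :: t => if r.1 = c.1 then (c.1, c.2.1, c.2.2 + r.2.2) :: t else c :: r :: t
  | [] => [c]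

def pvRLE : List Int → Int → List (Bool × Int × Int)
  | [], _ => []
  | x :: xs, i => pvMerge ((x == 1), i, 1) (pvRLE xs (i + 1))

theorem pvMerge_head (c : Bool × Int × Int) (rs : List (Bool × Int × Int)) :
    ∃ l t, pvMerge c rs = (c.1, c.2.1, l) :: t := by
  cases rs with
  | nil => exact ⟨c.2.2, [], rfl⟩
  | cons r t =>
    by_cases h : r.1 = c.1
    · exact ⟨c.2.2 + r.2.2, t, by simp [pvMerge, h]⟩
    · refine ⟨c.2.2, r :: t, ?_⟩
      simp only [pvMerge, if_neg h]

theorem pvMerge_merge (c : Bool × Int × Int) (i : Int) (r : List (Bool × Int × Int)) :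
    pvMerge c (pvMerge (c.1, i, 1) r) = pvMerge (c.1, c.2.1, c.2.2 + 1) r := by
  cases r with
  | nil => simp [pvMerge]
  | cons h t =>
    by_cases hh : h.1 = c.1
    · simp [pvMerge, hh, add_assoc]
    · simp [pvMerge, hh]

-- build-up of the runs list: B's foldl equals the recursive RLE
theorem pvFold_eq (xs : List Int) (i : Int) (done : List (Bool × Int × Int))
    (c : Bool × Int × Int) :
    (PySem.List.enumerate xs i).foldl pvRunStep (done ++ [c]) = done ++ pvMerge c (pvRLE xs i) := by
  induction xs generalizing i done c with
  | nil => simp [PySem.List.enumerate_nil, pvRLE, pvMerge]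
  | cons x xs ih =>
    rw [PySem.List.enumerate_cons, List.foldl_cons]
    by_cases hx : c.1 = ((x == 1) : Bool)
    · have hstep : pvRunStep (done ++ [c]) (i, x) = done ++ [(c.1, c.2.1, c.2.2 + 1)] := by
        simp [pvRunStep, hx]
      rw [hstep, ih, pvRLE, ← hx, pvMerge_merge]
    · have hstep : pvRunStep (done ++ [c]) (i, x) = (done ++ [c]) ++ [(((x == 1) : Bool), i, 1)] := by
        simp [pvRunStep, hx]
      rw [hstep, ih, pvRLE]
      obtain ⟨l, t, hm⟩ := pvMerge_head (((x == 1) : Bool), i, 1) (pvRLE xs (i + 1))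
      rw [hm]
      simp only [pvMerge, List.append_assoc, List.cons_append, List.nil_append]
      rw [if_neg (fun hc => hx (by rw [← hc]))]

theorem pvRuns_eq (seats : List Int) :
    (PySem.List.enumerate seats).foldl pvRunStep [] = pvRLE seats 0 := by
  cases seats with
  | nil => simp [PySem.List.enumerate_nil, pvRLE]
  | cons x xs =>
    rw [show PySem.List.enumerate (x :: xs) = PySem.List.enumerate (x :: xs) 0 from rfl,
      PySem.List.enumerate_cons, List.foldl_cons]
    have hstep : pvRunStep [] (0, x) = [] ++ [(((x == 1) : Bool), 0, 1)] := by
      simp [pvRunStep]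
    rw [hstep, pvFold_eq, pvRLE]
    simp

-- well-formedness of a runs list on the half-open span [i, e)
def pvGoodTo : Int → Int → List (Bool × Int × Int) → Prop
  | i, e, [] => i = e
  | i, e, r :: t => r.2.1 = i ∧ 1 ≤ r.2.2 ∧ (∀ r' ∈ t.head?, r'.1 ≠ r.1) ∧ pvGoodTo (i + r.2.2) e t

theorem pvGoodTo_congr (i e i' e' : Int) (rs : List (Bool × Int × Int))
    (hi : i = i') (he : e = e') (h : pvGoodTo i e rs) : pvGoodTo i' e' rs := by
  subst hi; subst he; exact h

theorem pvRLE_good (xs : List Int) (i : Int) : pvGoodTo i (i + xs.length) (pvRLE xs i) := by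
  induction xs generalizing i with
  | nil => simp [pvRLE, pvGoodTo]
  | cons x xs ih =>
    have hgr := ih (i + 1)
    rw [pvRLE]
    cases hr : pvRLE xs (i + 1) with
    | nil =>
      rw [hr] at hgr
      simp only [pvGoodTo] at hgr
      simp only [pvMerge, pvGoodTo, List.length_cons]
      refine ⟨by simp, by norm_num, by simp, by push_cast; omega⟩
    | cons h t =>
      obtain ⟨hb, hs, hl⟩ := h
      rw [hr] at hgr
      simp only [pvGoodTo] at hgr
      obtain ⟨hs1, hl1, halt, hrest⟩ := hgr
      by_cases hh : hb = ((x == 1) : Bool)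
      · simp only [pvMerge, if_pos hh, pvGoodTo, List.length_cons]
        refine ⟨by simp, by omega, ?_, ?_⟩
        · intro r' hr'
          have := halt r' hr'
          simp only at this ⊢
          rw [← hh]
          exact this
        · exact pvGoodTo_congr _ _ _ _ t (by ring) (by push_cast; ring) hrest
      · simp only [pvMerge, if_neg hh, pvGoodTo, List.length_cons]
        refine ⟨by simp, by norm_num, ?_, ?_⟩
        · intro r' hr'
          simp only [List.head?_cons, Option.mem_def, Option.some.injEq] at hr'
          subst hr'
          simp only
          exact fun hc => hh hc
        · refine ⟨hs1, hl1, halt, ?_⟩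
          exact pvGoodTo_congr _ _ _ _ t (by ring) (by push_cast; ring) hrest


-- the integer range [s, s+l)
def pvIR (s l : Int) : List Int := (List.range l.toNat).map (fun (k : Nat) => ((s + k : Int)))

theorem pvIR_cons (s l : Int) (hl : 0 ≤ l) : pvIR s (l + 1) = s :: pvIR (s + 1) l := by
  have h1 : (l + 1).toNat = l.toNat + 1 := by omega
  rw [pvIR, h1, List.range_succ_eq_map, List.map_cons, List.map_map, pvIR]
  refine congrArg₂ List.cons (by simp) ?_
  apply List.map_congr_left
  intro k _
  simp only [Function.comp_apply]
  push_cast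
  ring

theorem pvIR_one (s : Int) : pvIR s 1 = [s] := by
  simp [pvIR, List.range_succ]

theorem pvIR_eq_cons (s l : Int) (hl : 1 ≤ l) : pvIR s l = s :: pvIR (s + 1) (l - 1) := by
  have := pvIR_cons s (l - 1) (by omega)
  simpa using this

theorem pvIR_ne_nil (s l : Int) (hl : 1 ≤ l) : pvIR s l ≠ [] := by
  rw [pvIR_eq_cons s l hl]
  simp

theorem pvIR_getLast? (s l : Int) (hl : 1 ≤ l) : (pvIR s l).getLast? = some (s + l - 1) := by
  obtain ⟨n, hn⟩ : ∃ n, l.toNat = n + 1 := ⟨l.toNat - 1, by omega⟩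
  rw [pvIR, hn, List.range_succ, List.map_append, List.map_singleton, List.getLast?_concat]
  congr 1
  omega

def pvF (r : Bool × Int × Int) : List Int := if r.1 then pvIR r.2.1 r.2.2 else []

theorem pvOcc_flat (xs : List Int) (i : Int) : pvOcc xs i = (pvRLE xs i).flatMap pvF := by
  induction xs generalizing i with
  | nil => simp [pvOcc_nil, pvRLE]
  | cons x xs ih =>
    rw [pvOcc_cons, pvRLE]
    cases hr : pvRLE xs (i + 1) with
    | nil =>
      have hocc : pvOcc xs (i + 1) = [] := by rw [ih, hr]; simp
      by_cases hx : (x == 1) = true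
      · simp [pvMerge, hx, hocc, pvF, pvIR_one]
      · simp [pvMerge, hx, hocc, pvF]
    | cons h t =>
      obtain ⟨hb, hs, hl⟩ := h
      have hgd := pvRLE_good xs (i + 1)
      rw [hr] at hgd
      simp only [pvGoodTo] at hgd
      obtain ⟨hs1, hl1, -, -⟩ := hgd
      subst hs1
      by_cases hh : hb = ((x == 1) : Bool)
      · simp only [pvMerge, if_pos hh]
        rw [List.flatMap_cons, ih, hr, List.flatMap_cons]
        by_cases hx : (x == 1) = true
        · have hb1 : hb = true := by rw [hh, hx]
          simp only [pvF, hx, hb1, if_true]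
          rw [show (1 + hl) = hl + 1 from by ring, pvIR_cons _ _ (by omega)]
          simp
        · have hb1 : hb = false := by rw [hh]; exact Bool.not_eq_true _ ▸ (by simpa using hx)
          simp [pvF, hx, hb1]
      · simp only [pvMerge, if_neg hh]
        rw [List.flatMap_cons, ih, hr]
        by_cases hx : (x == 1) = true <;> simp [pvF, hx, pvIR_one]

-- `seats.index(1)` finds the first occupied index
theorem pvIndex_occ (xs : List Int) :
    ∀ (s f : Int) (L : List Int), pvOcc xs s = f :: L →
    ∃ k : Nat, PySem.List.index? xs 1 = some k ∧ s + k = f := by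
  induction xs with
  | nil => intro s f L h; rw [pvOcc_nil] at h; cases h
  | cons x t ih =>
    intro s f L h
    rw [pvOcc_cons] at h
    by_cases hx : (x == 1) = true
    · rw [if_pos hx] at h
      have hx1 : x = 1 := by simpa using hx
      subst hx1
      refine ⟨0, PySem.List.index?_cons_self _ _, ?_⟩
      have := (List.cons_eq_cons.mp h).1
      omega
    · rw [if_neg hx] at h
      obtain ⟨k, hk, hs⟩ := ih (s + 1) f L h
      refine ⟨k + 1, ?_, by omega⟩
      rw [PySem.List.index?_cons_of_ne _ (show x ≠ 1 by simpa using hx), hk]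
      rfl

theorem pvTrail_eq (rs : List (Bool × Int × Int)) (i e g : Int)
    (hg : pvGoodTo i e rs) (hlast : (rs.flatMap pvF).getLast? = some g) :
    pvTrailOf rs = e - 1 - g := by
  induction rs generalizing i with
  | nil => simp at hlast
  | cons r t ih =>
    obtain ⟨rb, rs1, rl⟩ := r
    simp only [pvGoodTo] at hg
    obtain ⟨h1, h2, halt, hrest⟩ := hg
    obtain rfl := h1.symm
    by_cases hft : t.flatMap pvF = []
    · cases t with
      | nil =>
        simp only [pvGoodTo] at hrest
        cases rb with
        | false => rw [List.flatMap_cons] at hlast; simp [pvF] at hlast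
        | true =>
          rw [List.flatMap_cons] at hlast
          simp only [pvF, if_true, List.flatMap_nil, List.append_nil] at hlast
          rw [pvIR_getLast? _ _ h2] at hlast
          have hgv : i + rl - 1 = g := by exact Option.some.inj hlast
          simp only [pvTrailOf, List.getLast?_singleton]
          norm_num
          omega
      | cons h' t' =>
        obtain ⟨hb', hs', hl'⟩ := h'
        simp only [pvGoodTo] at hrest
        obtain ⟨h1', h2', halt', hrest'⟩ := hrest
        subst h1'
        have hb'f : hb' = false := by
          cases hb' with
          | false => rfl
          | true =>
            exfalso
            apply pvIR_ne_nil (i + rl) hl' h2'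
            have : pvF (true, i + rl, hl') ++ t'.flatMap pvF = [] := by
              simpa [List.flatMap_cons] using hft
            simpa [pvF] using List.append_eq_nil_iff.mp this |>.1
        have hrbt : rb = true := by
          have := halt (hb', i + rl, hl') (by simp)
          simp only at this
          cases rb with
          | true => rfl
          | false => exact absurd (hb'f.trans rfl) this
        cases t' with
        | cons h'' t'' =>
          exfalso
          obtain ⟨hb'', hs'', hl''⟩ := h''
          simp only [pvGoodTo] at hrest'
          obtain ⟨h1'', h2'', -, -⟩ := hrest'
          have hb''t : hb'' = true := by
            have := halt' (hb'', hs'', hl'') (by simp)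
            simp only at this
            cases hb'' with
            | true => rfl
            | false => exact absurd (hb'f ▸ rfl) this
          apply pvIR_ne_nil hs'' hl'' h2''
          have : pvF (hb', i + rl, hl') ++ (pvF (hb'', hs'', hl'') ++ t''.flatMap pvF) = [] := by
            simpa [List.flatMap_cons] using hft
          have h3 := (List.append_eq_nil_iff.mp this).2
          have h4 := (List.append_eq_nil_iff.mp h3).1
          simpa [pvF, hb''t] using h4
        | nil =>
          subst hb'f hrbt
          simp only [pvGoodTo] at hrest'
          rw [List.flatMap_cons] at hlast
          simp only [pvF, if_true, List.flatMap_cons, List.flatMap_nil, Bool.false_eq_true,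
            if_false, List.append_nil] at hlast
          rw [pvIR_getLast? _ _ h2] at hlast
          have hgv : i + rl - 1 = g := Option.some.inj hlast
          simp only [pvTrailOf, List.getLast?_cons_cons, List.getLast?_singleton]
          norm_num
          omega
    · have hne : t ≠ [] := by rintro rfl; simp at hft
      rw [List.flatMap_cons, List.getLast?_append_of_ne_nil _ hft] at hlast
      have hstep : pvTrailOf ((rb, i, rl) :: t) = pvTrailOf t := by
        cases t with
        | nil => exact absurd rfl hne
        | cons a b => simp [pvTrailOf, List.getLast?_cons_cons]
      rw [hstep]
      exact ih (i + rl) hrest hlast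


-- the positive gaps between consecutive occupied seats, rendered as empty runs
def pvPosGaps : List Int → List (Bool × Int × Int)
  | a :: b :: t => if 0 < b - a - 1 then (false, a + 1, b - a - 1) :: pvPosGaps (b :: t)
                   else pvPosGaps (b :: t)
  | _ => []

theorem pvPosGaps_absorb (k : Int) (hk : 0 ≤ k) (a : Int) (M : List Int) :
    pvPosGaps (pvIR a (k + 1) ++ M) = pvPosGaps ((a + k) :: M) := by
  induction k, hk using Int.le_induction generalizing a M with
  | base => norm_num [pvIR_one]
  | succ k hk ih =>
    rw [pvIR_cons _ _ (by omega), pvIR_cons _ _ hk]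
    show pvPosGaps (a :: (a + 1) :: (pvIR (a + 1 + 1) k ++ M)) = _
    rw [pvPosGaps, if_neg (by omega)]
    rw [show (a + 1) :: (pvIR (a + 1 + 1) k ++ M) = (pvIR (a + 1) (k + 1) ++ M) from by
      rw [pvIR_cons _ _ hk]; rfl]
    rw [ih, show a + 1 + k = a + (k + 1) from by ring]

theorem pvPosGaps_emit (a b : Int) (M : List Int) (h : 0 < b - a - 1) :
    pvPosGaps (a :: b :: M) = (false, a + 1, b - a - 1) :: pvPosGaps (b :: M) := by
  rw [pvPosGaps, if_pos h]

theorem pvPosGaps_skip (a b : Int) (M : List Int) (h : b - a - 1 ≤ 0) :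
    pvPosGaps (a :: b :: M) = pvPosGaps (b :: M) := by
  rw [pvPosGaps, if_neg (by omega)]

theorem pvPosGaps_IR_absorb (s l : Int) (hl : 1 ≤ l) (M : List Int) :
    pvPosGaps (pvIR s l ++ M) = pvPosGaps ((s + l - 1) :: M) := by
  calc pvPosGaps (pvIR s l ++ M) = pvPosGaps (pvIR s ((l - 1) + 1) ++ M) := by norm_num
    _ = pvPosGaps ((s + (l - 1)) :: M) := pvPosGaps_absorb (l - 1) (by omega) s M
    _ = pvPosGaps ((s + l - 1) :: M) := by rw [show s + (l - 1) = s + l - 1 from by ring]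

theorem pvPosGaps_head_absorb (s l : Int) (hl : 1 ≤ l) (M : List Int) :
    pvPosGaps ((s - 1) :: (pvIR s l ++ M)) = pvPosGaps ((s + l - 1) :: M) := by
  have h : (s - 1) :: (pvIR s l ++ M) = pvIR (s - 1) (l + 1) ++ M := by
    rw [pvIR_cons _ _ (by omega)]
    norm_num
  rw [h]
  rw [pvPosGaps_absorb l (by omega) (s - 1) M]
  rw [show s - 1 + l = s + l - 1 from by ring]

theorem pvD (rs : List (Bool × Int × Int)) (i e : Int) (hg : pvGoodTo i e rs) :
    rs.dropLast.filter (fun r => r.1 = false) = pvPosGaps ((i - 1) :: rs.flatMap pvF) := by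
  induction rs generalizing i with
  | nil => simp [pvPosGaps]
  | cons r t ih =>
    obtain ⟨rb, rs1, rl⟩ := r
    simp only [pvGoodTo] at hg
    obtain ⟨h1, h2, halt, hrest⟩ := hg
    obtain rfl := h1.symm
    cases t with
    | nil =>
      simp only [List.dropLast_singleton, List.filter_nil, List.flatMap_cons, List.flatMap_nil,
        List.append_nil]
      cases rb with
      | false => simp [pvF, pvPosGaps]
      | true =>
        have hpf : pvF (true, i, rl) = pvIR i rl := by simp [pvF]
        rw [hpf]
        rw [show ((i : Int) - 1) :: pvIR i rl = (i - 1) :: (pvIR i rl ++ []) from by simp]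
        rw [pvPosGaps_head_absorb i rl h2]
        simp [pvPosGaps]
    | cons h' t' =>
      obtain ⟨hb', hs', hl'⟩ := h'
      have hrest0 := hrest
      simp only [pvGoodTo] at hrest0
      obtain ⟨h1', h2', -, -⟩ := hrest0
      subst h1'
      rw [List.dropLast_cons₂, List.filter_cons]
      have hIH := ih (i + rl) hrest
      cases rb with
      | true =>
        have hpf : pvF ((true : Bool), i, rl) = pvIR i rl := by simp [pvF]
        rw [if_neg (by simp), hIH]
        conv_rhs => rw [List.flatMap_cons, hpf]
        rw [pvPosGaps_head_absorb i rl h2]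
      | false =>
        have hb't : hb' = true := by
          have := halt (hb', i + rl, hl') (by simp)
          simp only at this
          cases hb' with
          | true => rfl
          | false => exact absurd rfl this
        subst hb't
        have hpf : pvF ((false : Bool), i, rl) = [] := by simp [pvF]
        have hpf' : pvF ((true : Bool), i + rl, hl') = pvIR (i + rl) hl' := by simp [pvF]
        rw [if_pos (by simp)]
        conv_rhs => rw [List.flatMap_cons, hpf, List.nil_append, List.flatMap_cons, hpf',
          pvIR_eq_cons _ _ h2', List.cons_append]
        rw [pvPosGaps_emit (i - 1) (i + rl) _ (by omega)]
        rw [show (i : Int) - 1 + 1 = i from by ring, show i + rl - (i - 1) - 1 = rl from by ring]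
        congr 1
        rw [hIH]
        conv_lhs => rw [List.flatMap_cons, hpf', pvIR_eq_cons _ _ h2', List.cons_append]
        rw [pvPosGaps_skip (i + rl - 1) (i + rl) _ (by omega)]

theorem pvC (rs : List (Bool × Int × Int)) (i e : Int) (hg : pvGoodTo i e rs) :
    rs.tail.dropLast.filter (fun r => r.1 = false) = pvPosGaps (rs.flatMap pvF) := by
  cases rs with
  | nil => simp [pvPosGaps]
  | cons r t =>
    obtain ⟨rb, rs1, rl⟩ := r
    simp only [pvGoodTo] at hg
    obtain ⟨h1, h2, halt, hrest⟩ := hg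
    obtain rfl := h1.symm
    rw [List.tail_cons, pvD t (i + rl) e hrest, List.flatMap_cons]
    cases rb with
    | true =>
      have hpf : pvF (true, i, rl) = pvIR i rl := by simp [pvF]
      rw [hpf, pvPosGaps_IR_absorb i rl h2]
    | false =>
      have hpf : pvF ((false : Bool), i, rl) = [] := by simp [pvF]
      rw [hpf, List.nil_append]
      cases t with
      | nil => simp [pvPosGaps]
      | cons h' t' =>
        obtain ⟨hb', hs', hl'⟩ := h'
        have hb't : hb' = true := by
          have := halt (hb', hs', hl') (by simp)
          simp only at this
          cases hb' with
          | true => rfl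
          | false => exact absurd rfl this
        subst hb't
        have hrest0 := hrest
        simp only [pvGoodTo] at hrest0
        obtain ⟨h1', h2', -, -⟩ := hrest0
        subst h1'
        have hpf' : pvF ((true : Bool), i + rl, hl') = pvIR (i + rl) hl' := by simp [pvF]
        rw [List.flatMap_cons, hpf', pvIR_eq_cons _ _ h2', List.cons_append]
        rw [pvPosGaps_skip (i + rl - 1) (i + rl) _ (by omega)]

theorem pvSlice_interior (rs : List (Bool × Int × Int)) :
    PySem.List.slice rs (some 1) (some (-1)) = rs.tail.dropLast := by
  cases rs with
  | nil => simp [PySem.List.slice, PySem.List.clampIdx]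
  | cons a t =>
    have h : ¬((t.length : Int) < 0) := by omega
    simp [PySem.List.slice, PySem.List.clampIdx, List.dropLast_eq_take, h]

theorem pvBest_filter (l : List (Bool × Int × Int)) (acc : Int × Int) :
    l.foldl pvBestStep acc = (l.filter (fun r => r.1 = false)).foldl pvBestStep acc := by
  induction l generalizing acc with
  | nil => rfl
  | cons r t ih =>
    by_cases h : r.1 = false
    · simp [h, List.foldl_cons, ih]
    · simp [h, List.foldl_cons, ih, pvBestStep]

def pvEnc : Option (Int × Int) → Int
  | none => 0
  | some p => p.1 + 1

-- B's scan over the positive-gap runs simulates A's scan over the occupied pairs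
theorem pvSim (O : List Int) :
    ∀ (m : Int) (cm : Option (Int × Int)), 0 ≤ m →
    (pvPosGaps O).foldl pvBestStep (m, pvEnc cm)
      = (((O.zip O.tail).foldl pvStep2 (m, cm)).1,
         pvEnc ((O.zip O.tail).foldl pvStep2 (m, cm)).2) := by
  induction O with
  | nil => intro m cm hm; simp [pvPosGaps]
  | cons a t ih =>
    intro m cm hm
    cases t with
    | nil => simp [pvPosGaps]
    | cons b t' =>
      rw [List.tail_cons, List.zip_cons_cons, List.foldl_cons]
      by_cases hd : 0 < b - a - 1
      · rw [pvPosGaps_emit a b t' hd, List.foldl_cons]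
        by_cases hlt : m < b - a - 1
        · have h1 : pvBestStep (m, pvEnc cm) (false, a + 1, b - a - 1) = (b - a - 1, a + 1) := by
            simp [pvBestStep, hlt]
          have h2 : pvStep2 (m, cm) (a, b) = (b - a - 1, some (a, b)) := by
            simp [pvStep2, hlt]
          rw [h1, h2]
          have := ih (b - a - 1) (some (a, b)) (by omega)
          simpa [pvEnc] using this
        · have h1 : pvBestStep (m, pvEnc cm) (false, a + 1, b - a - 1) = (m, pvEnc cm) := by
            simp [pvBestStep, hlt]
          have h2 : pvStep2 (m, cm) (a, b) = (m, cm) := by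
            simp [pvStep2, hlt]
          rw [h1, h2]
          exact ih m cm hm
      · rw [pvPosGaps_skip a b t' (by omega)]
        have h2 : pvStep2 (m, cm) (a, b) = (m, cm) := by
          simp only [pvStep2]
          rw [if_neg (by omega)]
        rw [h2]
        exact ih m cm hm

theorem pvFold2_inv (ps : List (Int × Int)) :
    ∀ (m : Int) (cm : Option (Int × Int)), 0 ≤ m →
    ((m = 0 ∧ cm = none) ∨ ∃ q, cm = some q ∧ q.2 - q.1 - 1 = m) →
    0 ≤ (ps.foldl pvStep2 (m, cm)).1 ∧
      (((ps.foldl pvStep2 (m, cm)).1 = 0 ∧ (ps.foldl pvStep2 (m, cm)).2 = none) ∨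
        ∃ q, (ps.foldl pvStep2 (m, cm)).2 = some q ∧
          q.2 - q.1 - 1 = (ps.foldl pvStep2 (m, cm)).1) := by
  induction ps with
  | nil => intro m cm hm hinv; exact ⟨hm, hinv⟩
  | cons p t ih =>
    intro m cm hm hinv
    rw [List.foldl_cons]
    by_cases hlt : m < p.2 - p.1 - 1
    · have h : pvStep2 (m, cm) p = (p.2 - p.1 - 1, some p) := by simp [pvStep2, hlt]
      rw [h]
      exact ih _ _ (by omega) (Or.inr ⟨p, rfl, rfl⟩)
    · have h : pvStep2 (m, cm) p = (m, cm) := by simp [pvStep2, hlt]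
      rw [h]
      exact ih _ _ hm hinv

-- ===== VERDICT (by name: the statement is the Claim_ definition above) =====
theorem findBestSeat_spec : Claim_equal_findBestSeat := by
  intro seats _ hpre
  unfold Spec_findBestSeat findBestSeat findBestSeat_alt
  cases seats with
  | nil => simp [Pre_findBestSeat] at hpre
  | cons a rest =>
  obtain ⟨f, L, hfl⟩ : ∃ f L, pvOcc (a :: rest) 0 = f :: L := by
    cases hocc : pvOcc (a :: rest) 0 with
    | nil => exact absurd hocc (pvOcc_ne_nil (a :: rest) 0 hpre)
    | cons f L => exact ⟨f, L, rfl⟩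
  obtain ⟨g, hg⟩ : ∃ g, (f :: L).getLast? = some g :=
    Option.isSome_iff_exists.mp (by simp)
  have hgmem : g ∈ f :: L := List.mem_of_getLast? hg
  have hgbd : 0 ≤ g ∧ g < 0 + ((a :: rest).length : Int) :=
    pvOcc_mem_bounds (a :: rest) 0 g (hfl ▸ hgmem)
  have hgood : pvGoodTo 0 (0 + ((a :: rest).length : Int)) (pvRLE (a :: rest) 0) :=
    pvRLE_good (a :: rest) 0
  have hflat : (pvRLE (a :: rest) 0).flatMap pvF = f :: L := by
    rw [← pvOcc_flat, hfl]
  obtain ⟨kf, hkf, hkf0⟩ := pvIndex_occ (a :: rest) 0 f L hfl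
  have htrail : pvTrailOf (pvRLE (a :: rest) 0) = (0 + ((a :: rest).length : Int)) - 1 - g :=
    pvTrail_eq _ 0 _ g hgood (by rw [hflat, hg])
  have hC : (pvRLE (a :: rest) 0).tail.dropLast.filter (fun r => r.1 = false)
      = pvPosGaps (f :: L) := by
    rw [pvC _ 0 _ hgood, hflat]
  have hsim := pvSim (f :: L) 0 none (le_refl 0)
  rw [List.tail_cons] at hsim
  have hinv := pvFold2_inv ((f :: L).zip L) 0 none (le_refl 0) (Or.inl ⟨rfl, rfl⟩)
  have hhd : PySem.List.pyGet? (a :: rest) 0 = some a := by simp [pysem]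
  simp only [foldA_before (a :: rest) 0 f L hfl, hg, hhd, Option.getD_some,
    pvRuns_eq, pvSlice_interior, hkf, htrail]
  rw [show ((kf : Nat) : Int) = f from by omega]
  rw [pvBest_filter ((pvRLE (a :: rest) 0).tail.dropLast) (0, 0), hC]
  rw [show ((0 : Int), (0 : Int)) = ((0 : Int), pvEnc none) from by simp [pvEnc], hsim]
  set P := ((f :: L).zip L).foldl pvStep2 (0, none) with hP
  have hc1 : ((P.1 ≤ f ∧ ¬((a == 1) = true)) ↔ (0 < f ∧ P.1 ≤ f)) := by
    constructor
    · rintro ⟨h, hne⟩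
      refine ⟨?_, h⟩
      have hf0 : ¬ f = 0 := fun h0 => hne (by simp [(pvHeadOne a rest f L hfl).mpr h0])
      have hfge : 0 ≤ f := (pvOcc_mem_bounds (a :: rest) 0 f (hfl ▸ (by simp : f ∈ f :: L))).1
      omega
    · rintro ⟨h0, h⟩
      refine ⟨h, fun hb => ?_⟩
      have := (pvHeadOne a rest f L hfl).mp (by simpa [beq_iff_eq] using hb)
      omega
  by_cases h1 : 0 < f ∧ P.1 ≤ f
  · rw [if_pos (hc1.mpr h1), if_pos h1]
  rw [if_neg (fun hx => h1 (hc1.mp hx)), if_neg h1]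
  by_cases h2 : P.1 ≤ 0 + ((a :: rest).length : Int) - 1 - g
  · rw [if_pos (by omega : P.1 < ((a :: rest).length : Int) - g),
      if_pos h2]
  rw [if_neg (by omega : ¬ P.1 < ((a :: rest).length : Int) - g),
    if_neg h2]
  obtain ⟨hP0, hshape⟩ := hinv
  have hpos : 0 < P.1 := by
    have := hgbd.2
    push_cast at h2 this
    omega
  rcases hshape with ⟨hz, -⟩ | ⟨q, hq, hgap⟩
  · omega
  · rw [hq]
    simp only [pvEnc]
    rw [show q.1 + 1 - 1 = q.1 from by ring, show P.1 + 1 = q.2 - q.1 from by omega]
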